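-- pv_equiv track=rewrite | github.com/fairygirl1/ai_parser | main.py | remove_duplicate_values
-- ===== SOURCE A (Python) =====
-- def remove_duplicate_values(results):
--     for url in results:
--         for tag in results[url]:
--             unique_values = []
--             duplicates = set()
--             for value in results[url][tag]:
--                 if value in duplicates:
--                     continue
--                 for other_tag in results[url]:
--                     if tag == other_tag:
--                         continue
--                     if value in results[url][other_tag]:
--                         duplicates.add(value)
--                         break
--                 else:
--                     unique_values.append(value)
--             results[url][tag] = unique_values
--     return results
-- ===== SOURCE B (Python) =====
-- def remove_duplicate_values(results):
--     # One backward pass per url: a value survives in a tag iff no LATER tag's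
--     # original list contains it (A removes it from every earlier tag first).
--     for url in results:
--         d = results[url]
--         seen = set()
--         for tag in reversed(list(d)):
--             vals = d[tag]
--             d[tag] = [v for v in vals if v not in seen]
--             seen.update(vals)
--     return results
-- ===== Notes on version B (the rewrite author's own statement) =====
-- stated objective: faster
-- what changed: A's per-value scan over all other tags against the partially-mutated dict is replaced by the observation that a value survives exactly in the last tag containing it, so B does one backward pass per url with a cumulative seen-set and no nested cross-tag search.
import Mathlib
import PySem

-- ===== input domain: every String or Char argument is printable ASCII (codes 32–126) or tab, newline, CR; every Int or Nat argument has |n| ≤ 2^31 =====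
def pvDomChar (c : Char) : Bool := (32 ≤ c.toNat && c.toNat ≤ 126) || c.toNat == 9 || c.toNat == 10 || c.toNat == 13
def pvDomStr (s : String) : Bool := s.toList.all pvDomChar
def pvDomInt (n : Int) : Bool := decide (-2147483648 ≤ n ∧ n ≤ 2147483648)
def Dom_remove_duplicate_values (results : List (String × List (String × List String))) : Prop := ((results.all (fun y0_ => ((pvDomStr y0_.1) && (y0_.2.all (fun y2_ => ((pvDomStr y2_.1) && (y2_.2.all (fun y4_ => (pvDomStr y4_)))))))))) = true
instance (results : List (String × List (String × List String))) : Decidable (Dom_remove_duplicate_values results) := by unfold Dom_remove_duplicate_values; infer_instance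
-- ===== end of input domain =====

-- B changes the algorithm: instead of A's per-value scan over all other tags of the
-- partially mutated dict, B makes one backward pass per url with a cumulative seen-set
-- (a value survives exactly in the last tag whose original list contains it).
-- Python A mutates `results` in place and returns it; the equivalence proved here is
-- about the returned value (B performs the same in-place mutation in Python).

-- ===== PORT A =====

-- first-match lookup results[url][tag] (Python dict: unique keys)
def pvGetTag : List (String × List String) → String → List String
  | [], _ => []
  | (k, v) :: rest, t => if k == t then v else pvGetTag rest t

-- results[url][tag] = nv : overwrite the first entry with key t, in place
def pvSetTag : List (String × List String) → String → List String → List (String × List String)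
  | [], _, _ => []
  | (k, v) :: rest, t, nv => if k == t then (k, nv) :: rest else (k, v) :: pvSetTag rest t nv

-- the inner 'for other_tag in results[url]: …' loop with its break (membership search)
def pvOther (cur : List (String × List String)) (tag value : String) : Bool :=
  cur.any (fun p => !(p.1 == tag) && p.2.contains value)

-- the 'for value in results[url][tag]' loop: state (unique_values, duplicates)
def pvAFilter (cur : List (String × List String)) (tag : String)
    (vals : List String) : List String × PySem.Set String :=
  vals.foldl (fun st value =>
    if PySem.Set.contains st.2 value then st
    else if pvOther cur tag value then (st.1, PySem.Set.add st.2 value)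
    else (st.1 ++ [value], st.2)) ([], PySem.Set.empty)

-- the 'for tag in results[url]' loop (keys are fixed; values mutate under it)
def pvATags (tags : List (String × List String)) : List (String × List String) :=
  (tags.map Prod.fst).foldl (fun cur tag =>
    pvSetTag cur tag (pvAFilter cur tag (pvGetTag cur tag)).1) tags

def remove_duplicate_values (results : List (String × List (String × List String))) : List (String × List (String × List String)) :=
  results.map (fun p => (p.1, pvATags p.2))

-- ===== PORT B =====

-- the 'for tag in reversed(list(d))' loop: recursing on the list processes the
-- suffix first, returning (filtered suffix, seen-set after absorbing the suffix)
def pvBTags : List (String × List String) → List (String × List String) × PySem.Set String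
  | [] => ([], PySem.Set.empty)
  | (k, vals) :: rest =>
    let r := pvBTags rest
    ((k, vals.filter (fun v => !PySem.Set.contains r.2 v)) :: r.1,
     PySem.Set.update r.2 vals)

def remove_duplicate_values_alt (results : List (String × List (String × List String))) : List (String × List (String × List String)) :=
  results.map (fun p => (p.1, (pvBTags p.2).1))

-- ===== PRECONDITION & SPEC =====
-- Pre_ excludes association lists in which some url's tag list has duplicate tag keys:
-- such lists do not correspond to any Python dict input (dict keys are unique), so no
-- input A accepts is excluded.
def Pre_remove_duplicate_values (results : List (String × List (String × List String))) : Prop :=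
  ∀ p ∈ results, (p.2.map Prod.fst).Nodup
instance (results : List (String × List (String × List String))) : Decidable (Pre_remove_duplicate_values results) := by unfold Pre_remove_duplicate_values; infer_instance

def pvWitness_remove_duplicate_values : (List (String × List (String × List String))) :=
  [("u", [("t1", ["x", "a"]), ("t2", ["x", "b"]), ("t3", ["x"])])]

def Spec_remove_duplicate_values (results : List (String × List (String × List String))) (out : List (String × List (String × List String))) : Prop := out = remove_duplicate_values_alt results
instance (results : List (String × List (String × List String))) (out : List (String × List (String × List String))) : Decidable (Spec_remove_duplicate_values results out) := by unfold Spec_remove_duplicate_values; infer_instance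

-- ===== CLAIM (what is proved, stated in full; the proofs are below) =====
def Claim_equal_remove_duplicate_values : Prop := ∀ (results : List (String × List (String × List String))), Dom_remove_duplicate_values results → Pre_remove_duplicate_values results → Spec_remove_duplicate_values results (remove_duplicate_values results)

-- ===== LEMMAS AND PROOFS =====

-- the common specification: entry i keeps exactly the values absent from all LATER lists
def pvSpec : List (String × List String) → List (String × List String)
  | [] => []
  | (k, vals) :: rest =>
    (k, vals.filter (fun v => !(rest.flatMap Prod.snd).contains v)) :: pvSpec rest

theorem pvBTags_seen (tags : List (String × List String)) :
    ∀ v, v ∈ (pvBTags tags).2 ↔ v ∈ tags.flatMap Prod.snd := by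
  induction tags with
  | nil => simp [pvBTags, PySem.Set.empty]
  | cons p rest ih =>
    obtain ⟨k, vals⟩ := p
    intro v
    simp [pvBTags, PySem.Set.mem_update, ih v, List.mem_flatMap]
    exact Or.comm

theorem pvB_eq_spec (tags : List (String × List String)) :
    (pvBTags tags).1 = pvSpec tags := by
  induction tags with
  | nil => rfl
  | cons p rest ih =>
    obtain ⟨k, vals⟩ := p
    simp only [pvBTags, pvSpec, List.cons.injEq, Prod.mk.injEq]
    refine ⟨⟨trivial, List.filter_congr ?_⟩, ih⟩
    intro v _
    rw [Bool.eq_iff_iff]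
    simp [pvBTags_seen rest v]

-- A's value loop: the duplicates set never changes what is kept
theorem pvAFilter_eq (cur : List (String × List String)) (tag : String) :
    ∀ (vals uv : List String) (dups : PySem.Set String),
      (∀ v ∈ dups, pvOther cur tag v = true) →
      (vals.foldl (fun st value =>
        if PySem.Set.contains st.2 value then st
        else if pvOther cur tag value then (st.1, PySem.Set.add st.2 value)
        else (st.1 ++ [value], st.2)) (uv, dups)).1
      = uv ++ vals.filter (fun v => !pvOther cur tag v) := by
  intro vals
  induction vals with
  | nil => simp
  | cons v vs ih =>
    intro uv dups hd
    by_cases hmem : v ∈ dups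
    · have hc : PySem.Set.contains dups v = true := (PySem.Set.contains_iff _ _).mpr hmem
      have ho : pvOther cur tag v = true := hd v hmem
      simp only [List.foldl_cons, hc, if_true, List.filter_cons, ho, Bool.not_true]
      simpa using ih uv dups hd
    · have hc : PySem.Set.contains dups v = false := by
        by_contra h
        exact hmem ((PySem.Set.contains_iff _ _).mp (by simpa using h))
      by_cases ho : pvOther cur tag v = true
      · simp only [List.foldl_cons, hc, Bool.false_eq_true, if_false, ho, if_true,
          List.filter_cons, Bool.not_true]
        have hd' : ∀ w ∈ PySem.Set.add dups v, pvOther cur tag w = true := by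
          intro w hw
          rw [PySem.Set.mem_add] at hw
          rcases hw with h | h
          · exact hd w h
          · exact h ▸ ho
        simpa using ih uv (PySem.Set.add dups v) hd'
      · have ho' : pvOther cur tag v = false := by simpa using ho
        simp only [List.foldl_cons, hc, Bool.false_eq_true, if_false, ho', List.filter_cons,
          Bool.not_false, if_true]
        rw [ih (uv ++ [v]) dups hd, List.append_assoc]
        rfl

-- first-match lookup/assignment skip a prefix whose keys differ
theorem pvGetTag_append_not_mem (l m : List (String × List String)) (t : String)
    (h : t ∉ l.map Prod.fst) : pvGetTag (l ++ m) t = pvGetTag m t := by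
  induction l with
  | nil => rfl
  | cons p rest ih =>
    simp only [List.map_cons, List.mem_cons] at h
    push Not at h
    have : ¬ (p.1 == t) = true := by simpa using fun he => h.1 (by simpa using he.symm)
    simp only [List.cons_append, pvGetTag, if_neg this]
    exact ih h.2

theorem pvSetTag_append_not_mem (l m : List (String × List String)) (t : String)
    (nv : List String) (h : t ∉ l.map Prod.fst) :
    pvSetTag (l ++ m) t nv = l ++ pvSetTag m t nv := by
  induction l with
  | nil => rfl
  | cons p rest ih =>
    simp only [List.map_cons, List.mem_cons] at h
    push Not at h
    have : ¬ (p.1 == t) = true := by simpa using fun he => h.1 (by simpa using he.symm)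
    simp only [List.cons_append, pvSetTag, if_neg this]
    exact congrArg _ (ih h.2)

-- inside the loop the cross-tag test reduces to membership in the LATER original lists
theorem pvOther_eq (spec' rest : List (String × List String)) (k : String)
    (vals : List String) (v : String)
    (hkre : k ∉ rest.map Prod.fst)
    (hval : v ∉ spec'.flatMap Prod.snd) :
    pvOther (spec' ++ (k, vals) :: rest) k v = (rest.flatMap Prod.snd).contains v := by
  rw [Bool.eq_iff_iff]
  simp only [pvOther, List.any_eq_true, List.mem_append, List.mem_cons,
    List.contains_iff_mem, List.mem_flatMap, Bool.and_eq_true, Bool.not_eq_true',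
    beq_eq_false_iff_ne, ne_eq]
  constructor
  · rintro ⟨p, hp | hp, hne, hc⟩
    · exact absurd (List.mem_flatMap.mpr ⟨p, hp, by simpa using hc⟩) hval
    · rcases hp with rfl | hp
      · exact absurd rfl hne
      · exact ⟨p, hp, by simpa using hc⟩
  · rintro ⟨p, hp, hc⟩
    refine ⟨p, Or.inr (Or.inr hp), fun he => hkre ?_, by simpa using hc⟩
    exact he ▸ List.mem_map.mpr ⟨p, hp, rfl⟩

-- loop invariant: a processed prefix spec' (already in final form, disjoint keys,
-- sharing no value with the unprocessed suffix) stays fixed while todo is processed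
theorem pvA_loop : ∀ (todo spec' : List (String × List String)),
    (todo.map Prod.fst).Nodup →
    (∀ t ∈ spec'.map Prod.fst, t ∉ todo.map Prod.fst) →
    (∀ v ∈ todo.flatMap Prod.snd, v ∉ spec'.flatMap Prod.snd) →
    (todo.map Prod.fst).foldl
      (fun cur tag => pvSetTag cur tag (pvAFilter cur tag (pvGetTag cur tag)).1)
      (spec' ++ todo)
    = spec' ++ pvSpec todo := by
  intro todo
  induction todo with
  | nil => intro spec' _ _ _; simp [pvSpec]
  | cons p rest ih =>
    obtain ⟨k, vals⟩ := p
    intro spec' hnd hdis hval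
    simp only [List.map_cons, List.nodup_cons] at hnd
    have hks : k ∉ spec'.map Prod.fst := fun h => (hdis k h) (by simp)
    have hget : pvGetTag (spec' ++ (k, vals) :: rest) k = vals := by
      rw [pvGetTag_append_not_mem _ _ _ hks]; simp [pvGetTag]
    have hfil : (pvAFilter (spec' ++ (k, vals) :: rest) k vals).1
        = vals.filter (fun v => !(rest.flatMap Prod.snd).contains v) := by
      unfold pvAFilter
      rw [pvAFilter_eq _ _ vals [] PySem.Set.empty (by simp [PySem.Set.empty])]
      rw [List.nil_append]
      apply List.filter_congr
      intro v hv
      rw [pvOther_eq spec' rest k vals v hnd.1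
        (fun hm => hval v (List.mem_flatMap.mpr ⟨(k, vals), by simp, hv⟩) hm)]
    set newv := vals.filter (fun v => !(rest.flatMap Prod.snd).contains v) with hnewv
    have hset : pvSetTag (spec' ++ (k, vals) :: rest) k newv = spec' ++ (k, newv) :: rest := by
      rw [pvSetTag_append_not_mem _ _ _ _ hks]; simp [pvSetTag]
    simp only [List.map_cons, List.foldl_cons, hget, hfil, hset]
    have hstep : spec' ++ (k, newv) :: rest = (spec' ++ [(k, newv)]) ++ rest := by simp
    rw [hstep, ih (spec' ++ [(k, newv)]) hnd.2 ?_ ?_]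
    · simp only [pvSpec, List.append_assoc, List.cons_append, List.nil_append]
      rw [hnewv]
    · intro t ht
      simp only [List.map_append, List.mem_append, List.map_cons, List.map_nil,
        List.mem_singleton] at ht
      rcases ht with ht | ht
      · exact fun hm => hdis t ht (by simp [hm])
      · exact ht ▸ hnd.1
    · intro v hv
      simp only [List.flatMap_append, List.mem_append]
      rintro (h | h)
      · exact hval v (by simp only [List.flatMap_cons, List.mem_append]; right; exact hv) h
      · simp only [List.flatMap_cons, List.flatMap_nil, List.append_nil, hnewv,
          List.mem_filter, Bool.not_eq_true'] at h
        exact absurd hv (by simpa using h.2)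

theorem pvA_eq_spec (tags : List (String × List String))
    (h : (tags.map Prod.fst).Nodup) : pvATags tags = pvSpec tags := by
  have := pvA_loop tags [] h (by simp) (by simp)
  simpa [pvATags] using this

-- ===== VERDICT (by name: the statement is the Claim_ definition above) =====
theorem remove_duplicate_values_spec : Claim_equal_remove_duplicate_values := by
  intro results _ hpre
  unfold Spec_remove_duplicate_values remove_duplicate_values remove_duplicate_values_alt
  apply List.map_congr_left
  intro p hp
  rw [pvA_eq_spec p.2 (hpre p hp), pvB_eq_spec]
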